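-- pv_equiv track=rewrite | github.com/robert-ancell/home-networking-explained | explain-100BASE-TX.py | encode_mlt_3
-- ===== SOURCE A (Python) =====
-- def encode_mlt_3 (data):
--     levels = [-1, 0, 1, 0]
--     index = 0
--     signal = []
--     for bit in data:
--         if bit == 1:
--             index = (index + 1) % 4
--         signal.append (levels[index])
--     return signal
-- ===== SOURCE B (Python) =====
-- def encode_mlt_3(data):
--     levels = [-1, 0, 1, 0]
--     out = []
--     index = 0
--     rest = data
--     while rest:
--         if rest[0] == 1:
--             run = 0
--             while run < len(rest) and rest[run] == 1:
--                 run += 1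
--             cyc = levels[index + 1:] + levels * (run // 4 + 1)
--             out += cyc[:run]
--             index = (index + run) % 4
--         else:
--             run = 0
--             while run < len(rest) and rest[run] != 1:
--                 run += 1
--             out += [levels[index]] * run
--         rest = rest[run:]
--     return out
-- ===== Notes on version B (the rewrite author's own statement) =====
-- stated objective: alternative
-- what changed: B replaces A's per-bit state update with run-length grouping: it scans maximal runs of 1s / non-1s and emits each whole segment at once (a slice of the cyclic level table for a 1-run, a repeated constant for a non-1-run).
import Mathlib
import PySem

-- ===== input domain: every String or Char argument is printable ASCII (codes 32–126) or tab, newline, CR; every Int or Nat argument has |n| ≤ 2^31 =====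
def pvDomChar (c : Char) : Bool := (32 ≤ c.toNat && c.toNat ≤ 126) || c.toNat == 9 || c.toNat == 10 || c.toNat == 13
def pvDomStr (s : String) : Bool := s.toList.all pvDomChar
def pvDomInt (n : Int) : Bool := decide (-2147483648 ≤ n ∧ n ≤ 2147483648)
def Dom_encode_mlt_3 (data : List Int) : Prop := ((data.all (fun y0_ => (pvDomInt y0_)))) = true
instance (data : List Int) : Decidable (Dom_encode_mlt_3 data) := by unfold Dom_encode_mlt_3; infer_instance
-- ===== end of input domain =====

-- B re-implements MLT-3 encoding by run-length grouping: it scans maximal runs of 1s / non-1s and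
-- emits whole segments at once (a slice of the cyclic level table for a 1-run, a repeated constant
-- for a non-1-run) instead of A's per-bit state update (alternative decomposition, same cost).


-- ===== PORT A =====
-- levels[index] : index is always in {0,1,2,3}, so the lookup never raises; pyGetD with default 0 is exact here
def encode_mlt_3 (data : List Int) : List Int :=
  (data.foldl
    (fun (st : Int × List Int) bit =>
      let index := if bit == 1 then PySem.Int.mod (st.1 + 1) 4 else st.1
      (index, st.2 ++ [PySem.List.pyGetD [-1, 0, 1, 0] index 0]))
    (0, [])).2

-- ===== PORT B =====
def pvLevels : List Int := [-1, 0, 1, 0]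

-- inner while: length of the maximal leading run of 1s
def pvRun1 : List Int → Nat
  | [] => 0
  | x :: xs => if x == 1 then pvRun1 xs + 1 else 0

-- inner while: length of the maximal leading run of non-1s
def pvRun0 : List Int → Nat
  | [] => 0
  | x :: xs => if x == 1 then 0 else pvRun0 xs + 1

-- levels * n  (Python list repetition)
def pvRepeatList (l : List Int) (n : Nat) : List Int := (List.replicate n l).flatten

theorem pvRun1_cons_pos (x : Int) (xs : List Int) (h : (x == 1) = true) :
    1 ≤ pvRun1 (x :: xs) := by simp [pvRun1, h]

theorem pvRun0_cons_pos (x : Int) (xs : List Int) (h : ¬ (x == 1) = true) :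
    1 ≤ pvRun0 (x :: xs) := by simp [pvRun0, h]

-- the outer while loop; index stays a nonnegative value < 4, so the Python slices
-- levels[index+1:], cyc[:run] and [levels[index]]*run are exactly drop/take/replicate
def pvGo (index : Nat) (rest : List Int) : List Int :=
  match rest with
  | [] => []
  | x :: xs =>
    if h : (x == 1) = true then
      (pvLevels.drop (index + 1) ++ pvRepeatList pvLevels (pvRun1 (x :: xs) / 4 + 1)).take
          (pvRun1 (x :: xs)) ++
        pvGo ((index + pvRun1 (x :: xs)) % 4) ((x :: xs).drop (pvRun1 (x :: xs)))
    else
      List.replicate (pvRun0 (x :: xs)) (pvLevels.getD index 0) ++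
        pvGo index ((x :: xs).drop (pvRun0 (x :: xs)))
termination_by rest.length
decreasing_by
  · have := pvRun1_cons_pos x xs h
    simp [List.length_drop]; omega
  · have := pvRun0_cons_pos x xs h
    simp [List.length_drop]; omega

def encode_mlt_3_alt (data : List Int) : List Int := pvGo 0 data

-- ===== PRECONDITION & SPEC =====
def Spec_encode_mlt_3 (data : List Int) (out : List Int) : Prop := out = encode_mlt_3_alt data
instance (data : List Int) (out : List Int) : Decidable (Spec_encode_mlt_3 data out) := by unfold Spec_encode_mlt_3; infer_instance

-- ===== CLAIM (what is proved, stated in full; the proofs are below) =====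
def Claim_equal_encode_mlt_3 : Prop := ∀ (data : List Int), Dom_encode_mlt_3 data → Spec_encode_mlt_3 data (encode_mlt_3 data)

-- ===== LEMMAS AND PROOFS =====

-- a position inside levels * k reads the table cyclically
theorem pvRep_getD (k j : Nat) (hj : j < 4 * k) :
    (pvRepeatList pvLevels k).getD j 0 = pvLevels.getD (j % 4) 0 := by
  induction k generalizing j with
  | zero => omega
  | succ k ih =>
    have hrep : pvRepeatList pvLevels (k + 1) = pvLevels ++ pvRepeatList pvLevels k := by
      simp [pvRepeatList, List.replicate_succ]
    rw [hrep]
    by_cases h4 : j < 4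
    · rw [List.getD_append _ _ _ _ (by simp [pvLevels]; omega)]
      congr 1; omega
    · rw [List.getD_append_right _ _ _ _ (by simp [pvLevels]; omega)]
      have hlev : pvLevels.length = 4 := by simp [pvLevels]
      rw [hlev, ih (j - 4) (by omega)]
      congr 1; omega

-- characterisation of the 1-run segment: cyc[:run] reads the level table cyclically from index+1
theorem pvCyc_take (i r : Nat) (hi : i < 4) :
    (pvLevels.drop (i + 1) ++ pvRepeatList pvLevels (r / 4 + 1)).take r
      = (List.range r).map (fun t => pvLevels.getD ((i + 1 + t) % 4) 0) := by
  have hlev : pvLevels.length = 4 := by simp [pvLevels]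
  have hreplen : (pvRepeatList pvLevels (r / 4 + 1)).length = 4 * (r / 4 + 1) := by
    simp [pvRepeatList, hlev, Nat.mul_comm]
  apply List.ext_getElem
  · simp [hlev, hreplen]; omega
  · intro t h1 h2
    have ht : t < r := by simpa using h2
    rw [List.getElem_take, List.getElem_map, List.getElem_range]
    rw [← List.getD_eq_getElem _ 0]
    by_cases hcase : t < 4 - (i + 1)
    · rw [List.getD_append _ _ _ _ (by simp [hlev]; omega)]
      rw [List.getD_eq_getElem _ 0 (by simp [hlev]; omega),
          List.getElem_drop, ← List.getD_eq_getElem _ 0]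
      congr 1; omega
    · rw [List.getD_append_right _ _ _ _ (by simp [hlev]; omega)]
      have hlen : (pvLevels.drop (i + 1)).length = 4 - (i + 1) := by simp [hlev]
      rw [hlen, pvRep_getD _ _ (by omega)]
      congr 1; omega

-- one step of the cyclic segment
theorem pvCyc_step (i r : Nat) (hi : i < 4) :
    (pvLevels.drop (i + 1) ++ pvRepeatList pvLevels ((r + 1) / 4 + 1)).take (r + 1)
      = pvLevels.getD ((i + 1) % 4) 0 ::
        (pvLevels.drop ((i + 1) % 4 + 1) ++ pvRepeatList pvLevels (r / 4 + 1)).take r := by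
  rw [pvCyc_take i (r + 1) hi, pvCyc_take ((i + 1) % 4) r (by omega)]
  rw [List.range_succ_eq_map, List.map_cons, List.map_map]
  have h0 : (i + 1 + 0) % 4 = (i + 1) % 4 := by omega
  rw [h0]
  congr 1
  apply List.map_congr_left
  intro t _
  simp only [Function.comp_apply]
  have h1 : (i + 1 + (t + 1)) % 4 = ((i + 1) % 4 + 1 + t) % 4 := by omega
  rw [h1]

-- pvGo consumes one element at a time exactly like A's loop body
theorem pvGo_cons (i : Nat) (x : Int) (xs : List Int) (hi : i < 4) :
    pvGo i (x :: xs) =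
      (if x == 1 then pvLevels.getD ((i + 1) % 4) 0 else pvLevels.getD i 0) ::
      pvGo (if x == 1 then (i + 1) % 4 else i) xs := by
  by_cases hx : (x == 1) = true
  · rw [pvGo, dif_pos hx]
    simp only [hx, if_true]
    have hr : pvRun1 (x :: xs) = pvRun1 xs + 1 := by simp [pvRun1, hx]
    rw [hr, pvCyc_step i (pvRun1 xs) hi]
    cases xs with
    | nil => simp [pvRun1, pvGo]
    | cons y ys =>
      by_cases hy : (y == 1) = true
      · rw [List.cons_append]
        congr 1
        conv_rhs => rw [pvGo]
        rw [dif_pos hy]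
        have hdrop : (x :: y :: ys).drop (pvRun1 (y :: ys) + 1) = (y :: ys).drop (pvRun1 (y :: ys)) := by
          simp [List.drop_succ_cons]
        rw [hdrop]
        have hmod : (i + (pvRun1 (y :: ys) + 1)) % 4 = ((i + 1) % 4 + pvRun1 (y :: ys)) % 4 := by
          omega
        rw [hmod]
      · have hr0 : pvRun1 (y :: ys) = 0 := by simp [pvRun1, hy]
        rw [hr0]
        simp only [List.take_zero, List.nil_append, List.drop_succ_cons, List.drop_zero,
          List.cons_append, Nat.zero_add]
  · rw [pvGo, dif_neg hx]
    simp only [hx, if_false, Bool.false_eq_true]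
    have hr : pvRun0 (x :: xs) = pvRun0 xs + 1 := by simp [pvRun0, hx]
    rw [hr, List.replicate_succ]
    cases xs with
    | nil => simp [pvRun0, pvGo]
    | cons y ys =>
      by_cases hy : (y == 1) = true
      · have hr0 : pvRun0 (y :: ys) = 0 := by simp [pvRun0, hy]
        rw [hr0]
        simp only [List.replicate_zero, List.nil_append, List.drop_succ_cons, List.drop_zero,
          List.cons_append]
      · rw [List.cons_append]
        congr 1
        conv_rhs => rw [pvGo]
        rw [dif_neg hy]
        simp [List.drop_succ_cons]

-- A's fold, started at index i (as an Int) and accumulator acc, equals acc ++ pvGo i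
theorem pv_fold_eq (data : List Int) : ∀ (i : Nat) (acc : List Int), i < 4 →
    (data.foldl
      (fun (st : Int × List Int) bit =>
        let index := if bit == 1 then PySem.Int.mod (st.1 + 1) 4 else st.1
        (index, st.2 ++ [PySem.List.pyGetD [-1, 0, 1, 0] index 0]))
      ((i : Int), acc)).2
    = acc ++ pvGo i data := by
  induction data with
  | nil => intro i acc _; simp [pvGo]
  | cons bit rest ih =>
    intro i acc hi
    rw [pvGo_cons i bit rest hi]
    by_cases hb : (bit == 1) = true
    · have hmod : PySem.Int.mod ((i : Int) + 1) 4 = (((i + 1) % 4 : Nat) : Int) := by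
        interval_cases i <;> decide
      have hget : PySem.List.pyGetD [-1, 0, 1, 0] (((i + 1) % 4 : Nat) : Int) 0
          = pvLevels.getD ((i + 1) % 4) 0 := by
        rw [PySem.List.pyGetD_natCast]; simp [pvLevels]
      simp only [List.foldl_cons, hb, if_true, hmod, hget]
      rw [ih ((i + 1) % 4) _ (by omega)]
      simp
    · have hget : PySem.List.pyGetD [-1, 0, 1, 0] ((i : Nat) : Int) 0 = pvLevels.getD i 0 := by
        rw [PySem.List.pyGetD_natCast]; simp [pvLevels]
      simp only [List.foldl_cons, hb, Bool.false_eq_true, if_false, hget]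
      rw [ih i _ hi]
      simp

-- ===== VERDICT (by name: the statement is the Claim_ definition above) =====
theorem encode_mlt_3_spec : Claim_equal_encode_mlt_3 := by
  intro data _
  show encode_mlt_3 data = encode_mlt_3_alt data
  unfold encode_mlt_3 encode_mlt_3_alt
  have h := pv_fold_eq data 0 [] (by omega)
  simpa using h
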